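-- pv_equiv track=rewrite | github.com/anshsgit/sql-syntax-checker | validator/SyntaxValidator.py | hasBalancedParentheses
-- ===== SOURCE A (Python) =====
-- def hasBalancedParentheses(name):
--     depth = 0
--     in_quote = False
--
--     for ch in name:
--         if ch in ('"', '`'):
--             in_quote = not in_quote
--
--         if in_quote:
--             continue
--
--         if ch == '(':
--             depth += 1
--         elif ch == ')':
--             depth -= 1
--             if depth < 0:
--                 return False
--
--     return depth == 0
-- ===== SOURCE B (Python) =====
-- def hasBalancedParentheses(name):
--     # Pass 1: strip quoted text (either '"' or '`' toggles one shared flag).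
--     outside = []
--     in_quote = False
--     for ch in name:
--         if ch in '"`':
--             in_quote = not in_quote
--         elif not in_quote:
--             outside.append(ch)
--     # Pass 2: depth scan with early exit on negative depth.
--     depth = 0
--     for ch in outside:
--         if ch == '(':
--             depth += 1
--         elif ch == ')':
--             depth -= 1
--             if depth < 0:
--                 return False
--     return depth == 0
-- ===== Notes on version B (the rewrite author's own statement) =====
-- stated objective: alternative
-- what changed: Split A's single stateful loop into two passes: a first pass filters out quoted text via the quote toggle, a second pass does a plain depth scan with the early negative-depth exit.
import Mathlib
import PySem

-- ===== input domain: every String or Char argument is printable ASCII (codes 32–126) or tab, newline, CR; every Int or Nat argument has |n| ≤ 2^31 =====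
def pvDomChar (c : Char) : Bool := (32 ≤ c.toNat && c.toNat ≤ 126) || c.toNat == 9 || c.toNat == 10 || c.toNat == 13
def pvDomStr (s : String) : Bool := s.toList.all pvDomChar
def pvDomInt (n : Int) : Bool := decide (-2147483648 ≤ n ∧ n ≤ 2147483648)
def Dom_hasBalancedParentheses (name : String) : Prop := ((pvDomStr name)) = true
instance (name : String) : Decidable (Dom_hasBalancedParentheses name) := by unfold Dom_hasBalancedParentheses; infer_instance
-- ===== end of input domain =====

-- B replaces A's single stateful loop by two passes (filter quoted text, then depth-scan); same cost, alternative decomposition.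

-- ===== PORT A =====
def hbpLoopA : List Char → Int → Bool → Bool
  | [], depth, _ => depth == 0
  | ch :: rest, depth, inq =>
    let inq' := if ch = '"' ∨ ch = '`' then !inq else inq
    if inq' then hbpLoopA rest depth inq'
    else if ch = '(' then hbpLoopA rest (depth + 1) inq'
    else if ch = ')' then
      if depth - 1 < 0 then false else hbpLoopA rest (depth - 1) inq'
    else hbpLoopA rest depth inq'

def hasBalancedParentheses (name : String) : Bool :=
  hbpLoopA name.toList 0 false

-- ===== PORT B =====
-- pass 1 of Source B: drop quote chars and characters inside quotes
def hbpFilter : List Char → Bool → List Char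
  | [], _ => []
  | ch :: rest, inq =>
    if ch = '"' ∨ ch = '`' then hbpFilter rest (!inq)
    else if inq then hbpFilter rest inq
    else ch :: hbpFilter rest inq

-- pass 2 of Source B: depth scan with early negative exit
def hbpScan : List Char → Int → Bool
  | [], depth => depth == 0
  | ch :: rest, depth =>
    if ch = '(' then hbpScan rest (depth + 1)
    else if ch = ')' then
      if depth - 1 < 0 then false else hbpScan rest (depth - 1)
    else hbpScan rest depth

def hasBalancedParentheses_alt (name : String) : Bool :=
  hbpScan (hbpFilter name.toList false) 0

-- ===== PRECONDITION & SPEC =====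
def Spec_hasBalancedParentheses (name : String) (out : Bool) : Prop := out = hasBalancedParentheses_alt name
instance (name : String) (out : Bool) : Decidable (Spec_hasBalancedParentheses name out) := by unfold Spec_hasBalancedParentheses; infer_instance

-- ===== CLAIM (what is proved, stated in full; the proofs are below) =====
def Claim_equal_hasBalancedParentheses : Prop := ∀ (name : String), Dom_hasBalancedParentheses name → Spec_hasBalancedParentheses name (hasBalancedParentheses name)

-- ===== LEMMAS AND PROOFS =====

theorem hbp_loop_eq (l : List Char) : ∀ (depth : Int) (inq : Bool),
    hbpLoopA l depth inq = hbpScan (hbpFilter l inq) depth := by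
  induction l with
  | nil => intro depth inq; simp [hbpLoopA, hbpFilter, hbpScan]
  | cons ch rest ih =>
    intro depth inq
    by_cases hq : ch = '"' ∨ ch = '`'
    · -- quote char: toggles the flag; never a paren, so it only matters for the flag
      rcases Bool.eq_false_or_eq_true inq with h | h <;>
        simp [hbpLoopA, hbpFilter, hq, h, ih] <;>
        rcases hq with rfl | rfl <;> simp
    · rcases Bool.eq_false_or_eq_true inq with h | h
      · -- inside quotes: both skip ch
        simp [hbpLoopA, hbpFilter, hq, h, ih]
      · -- outside quotes: both process ch the same way
        subst h
        rw [show hbpFilter (ch :: rest) false = ch :: hbpFilter rest false from by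
          simp [hbpFilter, hq]]
        simp only [hbpScan, hbpLoopA, hq, if_false]
        simp [ih]

-- ===== VERDICT (by name: the statement is the Claim_ definition above) =====
theorem hasBalancedParentheses_spec : Claim_equal_hasBalancedParentheses := by
  intro name _
  unfold Spec_hasBalancedParentheses hasBalancedParentheses hasBalancedParentheses_alt
  exact hbp_loop_eq name.toList 0 false
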